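-- pv_equiv track=rewrite | github.com/krystofhni/ulohy | uloha4.py | count_same_sum_pairs
-- ===== SOURCE A (Python) =====
-- def find_interval_sums(numbers):
--     # Pomocná funkce pro výpočet součtu intervalu
--     def interval_sum(nums, start, end):
--         return sum(nums[start:end+1])
--
--     # Seznam pro ukládání součtů intervalů
--     sums = []
--
--     # Výpočet součtů pro všechny možné intervaly délky alespoň 2
--     for i in range(len(numbers)):
--         for j in range(i + 1, len(numbers)):
--             sums.append(interval_sum(numbers, i, j))
--
--     return sums
--
-- def count_same_sum_pairs(numbers):
--     # Získání všech součtů intervalů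
--     sums = find_interval_sums(numbers)
--
--     # Seznam pro ukládání počtu součtů
--     sum_counts = {}
--
--     # Počítání počtu výskytů jednotlivých součtů
--     for sum_ in sums:
--         if sum_ in sum_counts:
--             sum_counts[sum_] += 1
--         else:
--             sum_counts[sum_] = 1
--
--     # Počítání dvojic s stejným součtem
--     pairs_count = 0
--     for count in sum_counts.values():
--         if count > 1:
--             pairs_count += count * (count - 1) // 2
--
--     return pairs_count
-- ===== SOURCE B (Python) =====
-- def count_same_sum_pairs(numbers):
--     # Prefix sums give each interval sum in O(1); a running counter counts
--     # equal-sum pairs incrementally, so no list of sums is ever materialised.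
--     n = len(numbers)
--     prefix = [0]
--     total = 0
--     for x in numbers:
--         total += x
--         prefix.append(total)
--     seen = {}
--     pairs = 0
--     for i in range(n):
--         for j in range(i + 2, n + 1):
--             s = prefix[j] - prefix[i]
--             pairs += seen.get(s, 0)
--             seen[s] = seen.get(s, 0) + 1
--     return pairs
-- ===== Notes on version B (the rewrite author's own statement) =====
-- stated objective: faster
-- what changed: B replaces A's re-summing of every slice (O(n^3)) and its two-phase count-then-combine with prefix sums giving each interval sum in O(1) plus a running counter that adds the number of previously seen equal sums, so no sums list or second pass exists.
import Mathlib
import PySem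

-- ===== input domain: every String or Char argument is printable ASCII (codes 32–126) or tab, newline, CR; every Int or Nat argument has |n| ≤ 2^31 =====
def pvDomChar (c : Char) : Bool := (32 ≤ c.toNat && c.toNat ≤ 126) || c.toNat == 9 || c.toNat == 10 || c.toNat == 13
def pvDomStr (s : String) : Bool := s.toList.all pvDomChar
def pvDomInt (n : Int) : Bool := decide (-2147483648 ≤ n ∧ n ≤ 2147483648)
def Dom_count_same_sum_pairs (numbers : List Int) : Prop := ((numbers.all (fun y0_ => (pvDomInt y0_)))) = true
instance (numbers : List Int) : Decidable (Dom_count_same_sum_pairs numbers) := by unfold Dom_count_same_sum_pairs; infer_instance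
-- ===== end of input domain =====

-- B replaces A's O(n^3) slice-summing and two-phase counter with prefix sums and
-- an incremental counter (O(n^2)); equal return value everywhere.

-- ===== PORT A =====
def interval_sum (nums : List Int) (start_ end_ : Int) : Int :=
  (PySem.List.slice nums (some start_) (some (end_ + 1))).sum

def find_interval_sums (numbers : List Int) : List Int :=
  (PySem.List.pyRange 0 (numbers.length : Int) 1).foldl
    (fun sums i =>
      (PySem.List.pyRange (i + 1) (numbers.length : Int) 1).foldl
        (fun sums j => sums ++ [interval_sum numbers i j]) sums) []

def count_same_sum_pairs (numbers : List Int) : Int :=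
  let sums := find_interval_sums numbers
  let sum_counts := sums.foldl
    (fun d s => if d.contains s then d.insert s (d.getD s 0 + 1) else d.insert s 1)
    PySem.Dict.empty
  sum_counts.values.foldl
    (fun pairs_count count =>
      if count > 1 then pairs_count + PySem.Int.floordiv (count * (count - 1)) 2
      else pairs_count) 0

-- ===== PORT B =====
-- the 'for x in numbers: total += x; prefix.append(total)' loop of Source B
def pvPrefixLoop : Int → List Int → List Int
  | _, [] => []
  | total, x :: xs => (total + x) :: pvPrefixLoop (total + x) xs

def count_same_sum_pairs_alt (numbers : List Int) : Int :=
  let n : Int := numbers.length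
  let prefix_ : List Int := 0 :: pvPrefixLoop 0 numbers
  let r := (PySem.List.pyRange 0 n 1).foldl
    (fun (st : PySem.Dict Int Int × Int) i =>
      (PySem.List.pyRange (i + 2) (n + 1) 1).foldl
        (fun st j =>
          let s := PySem.List.pyGetD prefix_ j 0 - PySem.List.pyGetD prefix_ i 0
          (st.1.insert s (st.1.getD s 0 + 1), st.2 + st.1.getD s 0)) st)
    (PySem.Dict.empty, 0)
  r.2

-- ===== PRECONDITION & SPEC =====
def Spec_count_same_sum_pairs (numbers : List Int) (out : Int) : Prop := out = count_same_sum_pairs_alt numbers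
instance (numbers : List Int) (out : Int) : Decidable (Spec_count_same_sum_pairs numbers out) := by unfold Spec_count_same_sum_pairs; infer_instance

-- ===== CLAIM (what is proved, stated in full; the proofs are below) =====
def Claim_equal_count_same_sum_pairs : Prop := ∀ (numbers : List Int), Dom_count_same_sum_pairs numbers → Spec_count_same_sum_pairs numbers (count_same_sum_pairs numbers)

-- ===== LEMMAS AND PROOFS =====

-- count of unordered equal pairs among c occurrences, as A computes it
def pvChoose2 (c : Int) : Int := PySem.Int.floordiv (c * (c - 1)) 2

-- canonical pair count of a multiset given as a list
def pvG (l : List Int) : Int :=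
  ((PySem.Set.ofList l).map (fun k => pvChoose2 (l.count k))).sum

-- B's incremental counting step
def pvStep (st : PySem.Dict Int Int × Int) (s : Int) : PySem.Dict Int Int × Int :=
  (st.1.insert s (st.1.getD s 0 + 1), st.2 + st.1.getD s 0)

lemma pvChoose2_succ (c : Int) : pvChoose2 (c + 1) = pvChoose2 c + c := by
  unfold pvChoose2
  rw [PySem.Int.floordiv_eq_ediv_of_pos (by omega), PySem.Int.floordiv_eq_ediv_of_pos (by omega)]
  have h1 : (c + 1) * (c + 1 - 1) = c * (c - 1) + 2 * c := by ring
  have h2 : (2 : Int) ∣ c * (c - 1) := by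
    have h := Int.even_mul_succ_self (c - 1)
    have he : (c - 1) * (c - 1 + 1) = c * (c - 1) := by ring
    rw [he] at h
    exact h.two_dvd
  obtain ⟨t, ht⟩ := h2
  rw [h1, ht]
  omega

lemma pvChoose2_one : pvChoose2 1 = 0 := by decide

lemma pvStep_fst (l : List Int) (d : PySem.Dict Int Int) (a : Int) :
    (l.foldl pvStep (d, a)).1 = l.foldl (fun d x => d.insert x (d.getD x 0 + 1)) d := by
  induction l generalizing d a with
  | nil => rfl
  | cons x xs ih => simp [pvStep, ih]

lemma pvG_append (l : List Int) (x : Int) :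
    pvG (l ++ [x]) = pvG l + l.count x := by
  unfold pvG
  rw [PySem.Set.ofList_append_singleton]
  have hcount : ∀ k : Int, k ≠ x → (l ++ [x]).count k = l.count k := by
    intro k hk
    rw [List.count_append]
    simp [Ne.symm hk]
  have hcx : ((l ++ [x]).count x : Int) = (l.count x : Int) + 1 := by
    simp [List.count_append]
  by_cases hx : x ∈ PySem.Set.ofList l
  · rw [PySem.Set.add_of_mem hx]
    have hnd : (PySem.Set.ofList l).Nodup := PySem.Set.nodup_ofList l
    obtain ⟨s1, s2, hS⟩ := List.append_of_mem hx
    rw [hS] at hnd ⊢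
    rw [List.nodup_append] at hnd
    have hx1 : x ∉ s1 := by
      intro h
      exact hnd.2.2 x h x List.mem_cons_self rfl
    have hx2 : x ∉ s2 := (List.nodup_cons.mp hnd.2.1).1
    have e1 : s1.map (fun k => pvChoose2 ((l ++ [x]).count k))
        = s1.map (fun k => pvChoose2 (l.count k)) :=
      List.map_congr_left fun k hk => by
        rw [hcount k (by rintro rfl; exact hx1 hk)]
    have e2 : s2.map (fun k => pvChoose2 ((l ++ [x]).count k))
        = s2.map (fun k => pvChoose2 (l.count k)) :=
      List.map_congr_left fun k hk => by
        rw [hcount k (by rintro rfl; exact hx2 hk)]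
    simp only [List.map_append, List.map_cons, List.sum_append, List.sum_cons, e1, e2]
    rw [hcx, pvChoose2_succ]
    ring
  · rw [PySem.Set.add_of_not_mem hx]
    have hxl : x ∉ l := fun h => hx ((PySem.Set.mem_ofList _ _).mpr h)
    have e1 : (PySem.Set.ofList l).map (fun k => pvChoose2 ((l ++ [x]).count k))
        = (PySem.Set.ofList l).map (fun k => pvChoose2 (l.count k)) :=
      List.map_congr_left fun k hk => by
        rw [hcount k (by rintro rfl; exact hxl ((PySem.Set.mem_ofList _ _).mp hk))]
    simp only [List.map_append, List.map_cons, List.map_nil, List.sum_append, List.sum_cons,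
      List.sum_nil, e1]
    have hc0 : l.count x = 0 := List.count_eq_zero.mpr hxl
    rw [hcx, hc0]
    simp [pvChoose2_one]

lemma pvFold_eq_pvG (l : List Int) :
    (l.foldl pvStep (PySem.Dict.empty, 0)).2 = pvG l := by
  induction l using List.reverseRecOn with
  | nil => rfl
  | append_singleton l x ih =>
    rw [List.foldl_append]
    have hfst : (l.foldl pvStep (PySem.Dict.empty, 0)).1.getD x 0 = (l.count x : Int) := by
      rw [pvStep_fst, PySem.Dict.foldl_insert_getD_add_one_eq_counter, PySem.Dict.getD_counter]
    simp only [List.foldl_cons, List.foldl_nil, pvStep]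
    rw [hfst, ih, pvG_append]

-- A's two-phase counting equals pvG of the sums list
lemma pvA_counts (sums : List Int) :
    (sums.foldl
      (fun d s => if d.contains s then d.insert s (d.getD s 0 + 1) else d.insert s 1)
      PySem.Dict.empty).values.foldl
      (fun pairs_count count =>
        if count > 1 then pairs_count + PySem.Int.floordiv (count * (count - 1)) 2
        else pairs_count) 0 = pvG sums := by
  have hstep : (fun (d : PySem.Dict Int Int) s =>
      if d.contains s then d.insert s (d.getD s 0 + 1) else d.insert s 1)
      = (fun (d : PySem.Dict Int Int) s => d.insert s (d.getD s 0 + 1)) := by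
    funext d s
    by_cases h : d.contains s
    · simp [h]
    · rw [if_neg (by simp [h]), PySem.Dict.getD_of_not_contains d 0 (by simpa using h)]
      norm_num
  rw [hstep, PySem.Dict.foldl_insert_getD_add_one_eq_counter]
  have hv : (PySem.Dict.counter sums).values
      = (PySem.Set.ofList sums).map (fun k => (sums.count k : Int)) := by
    show ((PySem.Dict.counter sums).items).map (·.2) = _
    rw [PySem.Dict.items_counter, List.map_map]
    simp
  rw [hv]
  have hcg : ∀ (acc : Int), ∀ c ∈ (PySem.Set.ofList sums).map (fun k => (sums.count k : Int)),
      (if c > 1 then acc + PySem.Int.floordiv (c * (c - 1)) 2 else acc) = acc + pvChoose2 c := by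
    intro acc c hc
    rw [List.mem_map] at hc
    obtain ⟨k, hk, rfl⟩ := hc
    have hkpos : 0 < sums.count k := List.count_pos_iff.mpr ((PySem.Set.mem_ofList sums k).mp hk)
    by_cases h1 : ((sums.count k : Int) > 1)
    · rw [if_pos h1]; rfl
    · have h2 : sums.count k = 1 := by omega
      rw [if_neg h1, h2]
      simp [pvChoose2_one]
  rw [PySem.List.foldl_congr_mem _ _ _ _ hcg, PySem.List.foldl_add, List.map_map]
  simp [pvG, Function.comp_def]

-- prefix list lookup = sum of a take
lemma pvPrefixLoop_getD (xs : List Int) (t : Int) (k : Nat) (hk : k < xs.length) :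
    (pvPrefixLoop t xs).getD k 0 = t + (xs.take (k + 1)).sum := by
  induction xs generalizing t k with
  | nil => simp at hk
  | cons x xs ih =>
    cases k with
    | zero => simp [pvPrefixLoop]
    | succ k =>
      simp only [pvPrefixLoop, List.getD_cons_succ, List.take_succ_cons, List.sum_cons]
      rw [ih (t + x) k (by simpa using hk)]
      ring

lemma pvPref_getD (numbers : List Int) (k : Nat) (hk : k ≤ numbers.length) :
    PySem.List.pyGetD (0 :: pvPrefixLoop 0 numbers) (k : Int) 0 = (numbers.take k).sum := by
  rw [PySem.List.pyGetD_natCast]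
  cases k with
  | zero => simp
  | succ k =>
    rw [List.getD_cons_succ, pvPrefixLoop_getD numbers 0 k (by omega)]
    simp

lemma pvSum_drop_take (xs : List Int) (a b : Nat) (hab : a ≤ b) :
    ((xs.drop a).take (b - a)).sum = (xs.take b).sum - (xs.take a).sum := by
  have hb : b = a + (b - a) := by omega
  have h : xs.take b = xs.take a ++ (xs.drop a).take (b - a) := by
    rw [hb, List.take_add]
    congr 2
    omega
  rw [h, List.sum_append]; ring

lemma pvInterval_eq (numbers : List Int) (i j : Int) (hi : 0 ≤ i) (hij : i ≤ j)
    (hj : j < (numbers.length : Int)) :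
    interval_sum numbers i j =
      PySem.List.pyGetD (0 :: pvPrefixLoop 0 numbers) (j + 1) 0 -
      PySem.List.pyGetD (0 :: pvPrefixLoop 0 numbers) i 0 := by
  obtain ⟨a, rfl⟩ : ∃ a : Nat, i = (a : Int) := ⟨i.toNat, by omega⟩
  obtain ⟨b, hb⟩ : ∃ b : Nat, j + 1 = (b : Int) := ⟨(j + 1).toNat, by omega⟩
  have hab : a ≤ b := by omega
  have hbl : b ≤ numbers.length := by omega
  have hal : a ≤ numbers.length := by omega
  unfold interval_sum
  rw [hb, PySem.List.slice_natCast, pvSum_drop_take numbers a b hab,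
      pvPref_getD numbers b hbl, pvPref_getD numbers a hal]

lemma pvFoldl_flatMap {α β γ : Type} (l : List α) (h : α → List β) (g : γ → β → γ) (init : γ) :
    l.foldl (fun st i => (h i).foldl g st) init = (l.flatMap h).foldl g init := by
  induction l generalizing init with
  | nil => rfl
  | cons x xs ih => simp [List.foldl_append, ih]

-- A's sums list in flatMap form
lemma pvSumsA (numbers : List Int) :
    find_interval_sums numbers =
      (PySem.List.pyRange 0 (numbers.length : Int) 1).flatMap
        (fun i => (PySem.List.pyRange (i + 1) (numbers.length : Int) 1).map
          (interval_sum numbers i)) := by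
  unfold find_interval_sums
  simp only [PySem.List.foldl_append_singleton_eq_map]
  rw [PySem.List.foldl_append_eq_flatMap]
  simp

-- B in flatMap form
lemma pvB_eq (numbers : List Int) :
    count_same_sum_pairs_alt numbers =
      (((PySem.List.pyRange 0 (numbers.length : Int) 1).flatMap
        (fun i => (PySem.List.pyRange (i + 2) ((numbers.length : Int) + 1) 1).map
          (fun j => PySem.List.pyGetD (0 :: pvPrefixLoop 0 numbers) j 0 -
                     PySem.List.pyGetD (0 :: pvPrefixLoop 0 numbers) i 0))).foldl
        pvStep (PySem.Dict.empty, 0)).2 := by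
  show ((PySem.List.pyRange 0 (numbers.length : Int) 1).foldl
    (fun (st : PySem.Dict Int Int × Int) i =>
      (PySem.List.pyRange (i + 2) ((numbers.length : Int) + 1) 1).foldl
        (fun st j => pvStep st (PySem.List.pyGetD (0 :: pvPrefixLoop 0 numbers) j 0 -
                     PySem.List.pyGetD (0 :: pvPrefixLoop 0 numbers) i 0)) st)
    (PySem.Dict.empty, 0)).2 = _
  have h1 : (fun (st : PySem.Dict Int Int × Int) i =>
      (PySem.List.pyRange (i + 2) ((numbers.length : Int) + 1) 1).foldl
        (fun st j => pvStep st (PySem.List.pyGetD (0 :: pvPrefixLoop 0 numbers) j 0 -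
                     PySem.List.pyGetD (0 :: pvPrefixLoop 0 numbers) i 0)) st)
      = (fun (st : PySem.Dict Int Int × Int) i =>
      ((PySem.List.pyRange (i + 2) ((numbers.length : Int) + 1) 1).map
        (fun j => PySem.List.pyGetD (0 :: pvPrefixLoop 0 numbers) j 0 -
                  PySem.List.pyGetD (0 :: pvPrefixLoop 0 numbers) i 0)).foldl pvStep st) :=
    funext fun st => funext fun i => by rw [List.foldl_map]
  rw [h1, pvFoldl_flatMap]

-- the two flatMaps of interval sums coincide
lemma pvSums_eq (numbers : List Int) :
    (PySem.List.pyRange 0 (numbers.length : Int) 1).flatMap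
        (fun i => (PySem.List.pyRange (i + 1) (numbers.length : Int) 1).map
          (interval_sum numbers i)) =
    (PySem.List.pyRange 0 (numbers.length : Int) 1).flatMap
        (fun i => (PySem.List.pyRange (i + 2) ((numbers.length : Int) + 1) 1).map
          (fun j => PySem.List.pyGetD (0 :: pvPrefixLoop 0 numbers) j 0 -
                     PySem.List.pyGetD (0 :: pvPrefixLoop 0 numbers) i 0)) := by
  apply List.flatMap_congr
  intro i hi
  rw [PySem.List.mem_pyRange_one] at hi
  have hr : ((numbers.length : Int) + 1 - (i + 2)) = (numbers.length : Int) - (i + 1) := by ring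
  rw [PySem.List.pyRange_one (i + 1), PySem.List.pyRange_one (i + 2), hr, List.map_map, List.map_map]
  apply List.map_congr_left
  intro k hk
  rw [List.mem_range] at hk
  have hkn : (i + 1) + (k : Int) < (numbers.length : Int) := by omega
  show interval_sum numbers i ((i + 1) + (k : Int)) = _
  have hj : (i + 2) + (k : Int) = ((i + 1) + (k : Int)) + 1 := by ring
  show _ = PySem.List.pyGetD (0 :: pvPrefixLoop 0 numbers) ((i + 2) + (k : Int)) 0 -
           PySem.List.pyGetD (0 :: pvPrefixLoop 0 numbers) i 0
  rw [hj]
  exact pvInterval_eq numbers i ((i + 1) + (k : Int)) (by omega) (by omega) hkn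

-- ===== VERDICT (by name: the statement is the Claim_ definition above) =====
theorem count_same_sum_pairs_spec : Claim_equal_count_same_sum_pairs := by
  intro numbers _
  show count_same_sum_pairs numbers = count_same_sum_pairs_alt numbers
  unfold count_same_sum_pairs
  rw [pvA_counts, pvSumsA, pvSums_eq, pvB_eq, pvFold_eq_pvG]
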